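-- pv_equiv track=rewrite | github.com/LyndenCooke/my-phonics | build_book.py | split_theme_into_pages
-- ===== SOURCE A (Python) =====
-- def split_theme_into_pages(theme: str, pages: int = 8) -> list[str]:
--     sentences = [s.strip() for s in theme.split(".") if s.strip()]
--     if not sentences:
--         return ["" for _ in range(pages)]
--     if len(sentences) >= pages:
--         return [f"{s}." for s in sentences[:pages]]
--
--     # pad by reusing the last sentence so every page has text
--     out = [f"{s}." for s in sentences]
--     while len(out) < pages:
--         out.append(out[-1])
--     return out
-- ===== SOURCE B (Python) =====
-- def split_theme_into_pages(theme: str, pages: int = 8) -> list[str]: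
--     # Single forward pass: one iterator over the raw fragments and a sticky
--     # current-page accumulator; each page pulls the next non-empty sentence if any,
--     # otherwise repeats the previous page (initially "").
--     it = iter(theme.split("."))
--     out, current = [], ""
--     for _ in range(pages):
--         for raw in it:
--             s = raw.strip()
--             if s:
--                 current = s + "."
--                 break
--         out.append(current)
--     return out
-- ===== Notes on version B (the rewrite author's own statement) =====
-- stated objective: alternative
-- what changed: A builds the full stripped-sentence list and then chooses between an empty-case branch, a truncating slice and a pad-while-loop; B never materialises the sentence list: it makes one lazy pass with a shared iterator over the raw fragments and a sticky current-page accumulator, so the empty case, truncation and padding all fall out of the same loop with no special-casing.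
-- outside the precondition, e.g. on split_theme_into_pages('a. b. c', -1): A returns ['a.', 'b.'], B returns []
import Mathlib
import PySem

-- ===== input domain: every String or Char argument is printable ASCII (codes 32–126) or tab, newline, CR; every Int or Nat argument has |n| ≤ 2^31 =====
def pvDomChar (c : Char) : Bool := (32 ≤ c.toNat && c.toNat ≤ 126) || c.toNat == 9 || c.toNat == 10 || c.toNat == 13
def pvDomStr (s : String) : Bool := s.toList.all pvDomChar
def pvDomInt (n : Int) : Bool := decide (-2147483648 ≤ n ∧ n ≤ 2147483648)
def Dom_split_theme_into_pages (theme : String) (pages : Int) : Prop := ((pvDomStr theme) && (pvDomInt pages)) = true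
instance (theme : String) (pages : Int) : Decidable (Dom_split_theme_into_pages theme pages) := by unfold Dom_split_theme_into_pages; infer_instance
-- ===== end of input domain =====

-- B replaces A's sentence list + three-way branch (empty case, truncating slice, pad-while-loop)
-- by one lazy pass: a shared iterator over the raw fragments and a sticky current page; proved equal for pages ≥ 0.

-- ===== PORT A =====
-- the while-loop 'while len(out) < pages: out.append(out[-1])'
def pvPadLoop (out : List String) (pages : Int) : List String :=
  if (out.length : Int) < pages then pvPadLoop (out ++ [PySem.List.pyGetD out (-1) ""]) pages
  else out
termination_by (pages - out.length).toNat
decreasing_by simp_all; omega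

def split_theme_into_pages (theme : String) (pages : Int) : List String :=
  -- theme.split(".") with a literal non-empty separator: split? returns some
  let sentences := (((PySem.Str.split? theme ".").getD []).map (fun s => PySem.Str.strip s)).filter (fun t => t ≠ "")
  if sentences = [] then
    (PySem.List.pyRange 0 pages 1).map (fun _ => "")
  else if pages ≤ (sentences.length : Int) then
    (PySem.List.slice sentences none (some pages)).map (fun s => s ++ ".")
  else
    pvPadLoop (sentences.map (fun s => s ++ ".")) pages

-- ===== PORT B =====
-- the inner 'for raw in it: … break' loop: advance the iterator to the next
-- non-empty stripped fragment; keep 'current' when the iterator is exhausted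
def pvNext (it : List String) (current : String) : List String × String :=
  match it with
  | [] => ([], current)
  | raw :: rest =>
      let s := PySem.Str.strip raw
      if s = "" then pvNext rest current else (rest, s ++ ".")

-- the body of 'for _ in range(pages)': state = (iterator, current, out)
def pvStep (st : List String × String × List String) (_i : Int) : List String × String × List String :=
  let n := pvNext st.1 st.2.1
  (n.1, n.2, st.2.2 ++ [n.2])

def split_theme_into_pages_alt (theme : String) (pages : Int) : List String :=
  let it0 := (PySem.Str.split? theme ".").getD []
  ((PySem.List.pyRange 0 pages 1).foldl pvStep (it0, "", [])).2.2

-- ===== PRECONDITION & SPEC =====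
-- Pre_ excludes negative page counts, which are outside the function's natural domain: there A's
-- value is an accident of Python's negative slicing (sentences[:pages] drops pages from the end)
-- while B's loop simply runs zero times.
def Pre_split_theme_into_pages (theme : String) (pages : Int) : Prop := 0 ≤ pages
instance (theme : String) (pages : Int) : Decidable (Pre_split_theme_into_pages theme pages) := by
  unfold Pre_split_theme_into_pages; infer_instance

def pvWitness_split_theme_into_pages : String × Int := ("Cats purr. Dogs bark", 3)

def Spec_split_theme_into_pages (theme : String) (pages : Int) (out : List String) : Prop := out = split_theme_into_pages_alt theme pages
instance (theme : String) (pages : Int) (out : List String) : Decidable (Spec_split_theme_into_pages theme pages out) := by unfold Spec_split_theme_into_pages; infer_instance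

-- ===== CLAIM (what is proved, stated in full; the proofs are below) =====
def Claim_equal_split_theme_into_pages : Prop := ∀ (theme : String) (pages : Int), Dom_split_theme_into_pages theme pages → Pre_split_theme_into_pages theme pages → Spec_split_theme_into_pages theme pages (split_theme_into_pages theme pages)

-- ===== LEMMAS AND PROOFS =====

-- the non-empty stripped-and-formatted sentences still ahead of the iterator
def pvF (it : List String) : List String :=
  ((it.map (fun s => PySem.Str.strip s)).filter (fun t => t ≠ "")).map (fun s => s ++ ".")

theorem pvNext_empty (it : List String) (cur : String) (h : pvF it = []) :
    pvNext it cur = ([], cur) := by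
  induction it with
  | nil => rfl
  | cons x rest ih =>
      simp only [pvF, List.map_cons, List.filter_cons] at h
      by_cases hx : PySem.Str.strip x = ""
      · simp only [hx] at h
        simp only [pvNext, hx, if_pos rfl]
        exact ih (by simpa [pvF] using h)
      · simp [hx] at h
  termination_by it.length

theorem pvNext_cons (it : List String) (cur f : String) (fs : List String)
    (h : pvF it = f :: fs) :
    (pvNext it cur).2 = f ∧ pvF (pvNext it cur).1 = fs := by
  induction it with
  | nil => simp [pvF] at h
  | cons x rest ih =>
      by_cases hx : PySem.Str.strip x = ""
      · have h' : pvF rest = f :: fs := by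
          simpa [pvF, List.filter_cons, hx] using h
        simpa [pvNext, hx] using ih h'
      · have h' : (PySem.Str.strip x ++ ".") :: pvF rest = f :: fs := by
          simpa [pvF, List.filter_cons, hx] using h
        obtain ⟨h1, h2⟩ := List.cons.injEq .. ▸ h'
        constructor
        · simp [pvNext, hx, h1]
        · simpa [pvNext, hx] using h2

-- the pages produced by running the loop body p times from state (it, cur)
def pvPages (it : List String) (cur : String) (p : Nat) : List String :=
  match p with
  | 0 => []
  | Nat.succ q =>
      let n := pvNext it cur
      n.2 :: pvPages n.1 n.2 q

theorem pv_fold (l : List Int) (it : List String) (cur : String) (out : List String) :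
    (l.foldl pvStep (it, cur, out)).2.2 = out ++ pvPages it cur l.length := by
  induction l generalizing it cur out with
  | nil => simp [pvPages]
  | cons a l ih =>
      simp only [List.foldl_cons, List.length_cons, pvPages]
      rw [show pvStep (it, cur, out) a
            = ((pvNext it cur).1, (pvNext it cur).2, out ++ [(pvNext it cur).2]) from rfl]
      rw [ih]
      simp

-- the loop's pages in closed form: the remaining sentences, truncated to p,
-- then the last one (or the incoming current page) repeated
theorem pvPages_eq (p : Nat) (it : List String) (cur : String) :
    pvPages it cur p
      = (pvF it).take p ++ List.replicate (p - (pvF it).length) ((pvF it).getLastD cur) := by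
  induction p generalizing it cur with
  | zero => simp [pvPages]
  | succ q ih =>
      cases h : pvF it with
      | nil =>
          rw [pvPages]
          simp only [pvNext_empty it cur h]
          rw [ih [] cur]
          simp [pvF, List.replicate_succ]
      | cons f fs =>
          obtain ⟨h1, h2⟩ := pvNext_cons it cur f fs h
          rw [pvPages, ih, h1, h2]
          have hg : (f :: fs).getLastD cur = fs.getLastD f := List.getLastD_cons ..
          simp only [List.take_succ_cons, List.length_cons, Nat.succ_sub_succ, hg,
            List.cons_append]

-- the pad loop appends copies of the last element until the length reaches pages
theorem pv_padLoop_eq (n : Nat) (out : List String) (hout : out ≠ []) (pages : Int)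
    (hn : (pages - out.length).toNat = n) :
    pvPadLoop out pages = out ++ List.replicate n (out.getLastD "") := by
  induction n generalizing out with
  | zero =>
      rw [pvPadLoop]
      have h0 : ¬ ((out.length : Int) < pages) := by omega
      simp only [h0, if_false, List.replicate_zero, List.append_nil]
  | succ n ih =>
      rw [pvPadLoop]
      have hlt : (out.length : Int) < pages := by omega
      have hget : PySem.List.pyGetD out (-1) "" = out.getLastD "" := by
        rw [PySem.List.pyGetD_neg_one out "" hout, List.getLastD_eq_getLast?,
          List.getLast?_eq_some_getLast hout]
        rfl
      simp only [hlt, if_pos, hget]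
      rw [ih (out ++ [out.getLastD ""]) (by simp) (by simp; omega)]
      simp [List.replicate_succ]

theorem split_theme_into_pages_eq (theme : String) (pages : Int) (hp : 0 ≤ pages) :
    split_theme_into_pages theme pages = split_theme_into_pages_alt theme pages := by
  obtain ⟨p, rfl⟩ : ∃ p : Nat, pages = (p : Int) := ⟨pages.toNat, by omega⟩
  unfold split_theme_into_pages split_theme_into_pages_alt
  set it0 := (PySem.Str.split? theme ".").getD [] with hit0
  set S := ((it0.map (fun s => PySem.Str.strip s)).filter (fun t => t ≠ "")) with hS
  -- B in closed form
  have hlenR : (PySem.List.pyRange 0 (p : Int) 1).length = p := by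
    rw [PySem.List.length_pyRange_one]; omega
  have hB : ((PySem.List.pyRange 0 (p : Int) 1).foldl pvStep (it0, "", [])).2.2
      = (pvF it0).take p ++ List.replicate (p - (pvF it0).length) ((pvF it0).getLastD "") := by
    rw [pv_fold, hlenR, pvPages_eq]; simp
  have hFS : pvF it0 = S.map (fun s => s ++ ".") := rfl
  by_cases hnil : S = []
  · have hFnil : pvF it0 = [] := by rw [hFS, hnil]; rfl
    rw [hB, hFnil, if_pos hnil]
    simp [List.map_const', hlenR]
  · have hF : pvF it0 ≠ [] := by rw [hFS]; simpa using hnil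
    have hFlen : (pvF it0).length = S.length := by rw [hFS]; simp
    rw [hB]
    by_cases hcase : (p : Int) ≤ (S.length : Int)
    · rw [if_neg hnil, if_pos hcase, PySem.List.slice_to S (by omega)]
      have h0 : p - (pvF it0).length = 0 := by omega
      rw [h0, List.replicate_zero, List.append_nil]
      simp [hFS, List.map_take]
    · rw [if_neg hnil, if_neg hcase, ← hFS,
        pv_padLoop_eq (p - (pvF it0).length) (pvF it0) hF (p : Int) (by omega),
        List.take_of_length_le (by omega)]

-- ===== VERDICT (by name: the statement is the Claim_ definition above) =====
theorem split_theme_into_pages_spec : Claim_equal_split_theme_into_pages := by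
  intro theme pages _ hpre
  exact split_theme_into_pages_eq theme pages hpre
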